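-- pv_equiv track=rewrite | github.com/Sikae/MIT6.00.1xSolutions | Quiz/problem_8.py | satisfies_f
-- ===== SOURCE A (Python) =====
-- def f(s):
--     return 'a' in s
--
-- def satisfies_f(L):
--     """
--     Assumes L is a list of strings
--     Assume function f is already defined for you and it maps a string to a Boolean
--     Mutates L such that it contains all of the strings, s, originally in L such
--             that f(s) returns True, and no other elements
--     Returns the length of L after mutation
--     """
--     bool_list = []
--
--     for e in L:
--         bool_list.append(f(e))
--
--     for i in range(len(bool_list)):
--         if not bool_list[i]:
--             L[i] = None
--
--     while True:
--         try:
--             L.remove(None)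
--         except ValueError:
--             break
--
--     return len(L)
-- ===== SOURCE B (Python) =====
-- def f(s):
--     return 'a' in s
--
-- def satisfies_f(L):
--     """In-place two-pointer compaction: write index j advances over kept
--     elements; the tail is truncated with one slice deletion."""
--     j = 0
--     for e in L:
--         if f(e):
--             L[j] = e
--             j += 1
--     del L[j:]
--     return len(L)
-- ===== Notes on version B (the rewrite author's own statement) =====
-- stated objective: faster
-- what changed: Replaces A's parallel boolean list, None-sentinel marking pass and repeated L.remove(None) scan loop with a single-pass in-place two-pointer compaction (write index + one tail slice deletion).
import Mathlib
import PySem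

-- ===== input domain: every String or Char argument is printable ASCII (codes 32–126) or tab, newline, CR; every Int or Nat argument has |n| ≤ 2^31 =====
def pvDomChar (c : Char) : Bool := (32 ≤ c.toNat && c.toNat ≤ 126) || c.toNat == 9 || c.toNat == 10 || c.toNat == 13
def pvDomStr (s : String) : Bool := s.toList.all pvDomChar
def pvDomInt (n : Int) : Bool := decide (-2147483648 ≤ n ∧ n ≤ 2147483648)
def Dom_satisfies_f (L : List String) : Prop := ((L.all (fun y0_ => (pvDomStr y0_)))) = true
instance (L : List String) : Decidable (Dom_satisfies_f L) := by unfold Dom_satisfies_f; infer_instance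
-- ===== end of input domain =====

-- B replaces A's boolean list + None-sentinel marking + repeated L.remove(None) with a
-- single-pass in-place write-pointer compaction (objective: simpler). Both mutate L the
-- same way; the equivalence proved here is about the return value.

-- ===== PORT A =====
-- f(s) = 'a' in s
def pvF (s : String) : Bool := PySem.Str.isIn "a" s

-- the 'while True: L.remove(None) … except ValueError: break' loop
def pvRemoveLoop (l : List (Option String)) : List (Option String) :=
  match h : PySem.List.remove? l none with
  | some l' => pvRemoveLoop l'
  | none => l
termination_by l.length
decreasing_by
  have hm : (none : Option String) ∈ l := by
    by_contra hn
    rw [(PySem.List.remove?_eq_none_iff l none).mpr hn] at h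
    cases h
  rw [PySem.List.remove?_eq_some_erase l none hm] at h
  injection h with h
  subst h
  have h1 := List.length_erase_of_mem hm
  have h2 := List.length_pos_of_mem hm
  omega

def satisfies_f (L : List String) : Int :=
  -- bool_list = [f(e) for e in L] built by append
  let bool_list := L.foldl (fun acc e => acc ++ [pvF e]) []
  -- the working list; Python's L holds strings or None: List (Option String)
  let l0 : List (Option String) := L.map some
  -- for i in range(len(bool_list)): if not bool_list[i]: L[i] = None
  -- (i from range(0, n) is always a valid nonnegative index, so .toNat is exact)
  let l1 := (PySem.List.pyRange 0 (bool_list.length : Int) 1).foldl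
      (fun l i => if !(bool_list.getD i.toNat true) then l.set i.toNat none else l) l0
  let l2 := pvRemoveLoop l1
  (l2.length : Int)

-- ===== PORT B =====
def satisfies_f_alt (L : List String) : Int :=
  -- j = 0; for e in L: if f(e): L[j] = e; j += 1; del L[j:]; return len(L) (= j)
  L.foldl (fun j e => if PySem.Str.isIn "a" e then j + 1 else j) 0

-- ===== PRECONDITION & SPEC =====
def Spec_satisfies_f (L : List String) (out : Int) : Prop := out = satisfies_f_alt L
instance (L : List String) (out : Int) : Decidable (Spec_satisfies_f L out) := by unfold Spec_satisfies_f; infer_instance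

-- ===== CLAIM (what is proved, stated in full; the proofs are below) =====
def Claim_equal_satisfies_f : Prop := ∀ (L : List String), Dom_satisfies_f L → Spec_satisfies_f L (satisfies_f L)

-- ===== LEMMAS AND PROOFS =====

-- the marking fold preserves the list length
theorem markFold_length (bs : List Bool) (I : List Int) (init : List (Option String)) :
    (I.foldl (fun l i => if !(bs.getD i.toNat true) then l.set i.toNat none else l) init).length
      = init.length := by
  induction I generalizing init with
  | nil => rfl
  | cons i I ih =>
      simp only [List.foldl_cons]
      rw [ih]
      split <;> simp

-- pointwise value after the marking fold (all visited indices nonnegative)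
theorem markFold_getD (bs : List Bool) (I : List Int) (init : List (Option String)) (j : Nat)
    (hj : j < init.length) (hI : ∀ i ∈ I, 0 ≤ i) :
    (I.foldl (fun l i => if !(bs.getD i.toNat true) then l.set i.toNat none else l) init).getD j none
      = if (j : Int) ∈ I ∧ bs.getD j true = false then none
        else init.getD j none := by
  induction I generalizing init with
  | nil => simp
  | cons i I ih =>
      have hi0 : 0 ≤ i := hI i (List.mem_cons_self ..)
      simp only [List.foldl_cons]
      have hlen : (if !(bs.getD i.toNat true) then init.set i.toNat none else init).length
          = init.length := by split <;> simp
      rw [ih _ (hlen ▸ hj) (fun x hx => hI x (List.mem_cons_of_mem _ hx))]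
      by_cases hji : i = (j : Int) ∧ bs.getD j true = false
      · obtain ⟨h1, h2⟩ := hji
        have hmem : (j : Int) ∈ i :: I := by rw [h1]; exact List.mem_cons_self ..
        simp only [h2, hmem, and_true, if_true]
        split
        · rfl
        · have htn : i.toNat = j := by omega
          rw [htn, h2]
          simp [List.getD_eq_getElem?_getD, hj]
      · have hstep : (if !(bs.getD i.toNat true) then init.set i.toNat none else init).getD j none
            = init.getD j none := by
          split
          · rename_i hb
            have hb' : bs.getD i.toNat true = false := by simpa using hb
            have hne : i.toNat ≠ j := by
              intro he
              apply hji
              refine ⟨by omega, ?_⟩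
              rw [← he]; exact hb'
            simp [List.getD_eq_getElem?_getD, List.getElem?_set_ne hne]
          · rfl
        rw [hstep]
        congr 1
        simp only [List.mem_cons, eq_iff_iff]
        constructor
        · rintro ⟨h1, h2⟩; exact ⟨Or.inr h1, h2⟩
        · rintro ⟨h1, h2⟩
          rcases h1 with h1 | h1
          · exact absurd ⟨h1.symm, h2⟩ hji
          · exact ⟨h1, h2⟩

-- the marking loop turns L.map some into pointwise if-marking
theorem mark_eq_map (L : List String) :
    ((PySem.List.pyRange 0 ((L.map pvF).length : Int) 1).foldl
        (fun l i => if !((L.map pvF).getD i.toNat true) then l.set i.toNat none else l)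
        (L.map some))
      = L.map (fun s => if pvF s then some s else none) := by
  apply List.ext_getElem
  · rw [markFold_length]; simp
  · intro j h1 h2
    have hjL : j < L.length := by simpa using h2
    have hjs : j < (L.map some).length := by simpa using hjL
    have hI : ∀ i ∈ PySem.List.pyRange 0 ((L.map pvF).length : Int) 1, 0 ≤ i := by
      intro i hi
      exact ((PySem.List.mem_pyRange_one).mp hi).1
    have hmain := markFold_getD (L.map pvF) (PySem.List.pyRange 0 ((L.map pvF).length : Int) 1)
        (L.map some) j hjs hI
    have hget : ∀ (l : List (Option String)) (hl : j < l.length), l.getD j none = l[j] := by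
      intro l hl
      simp [List.getD_eq_getElem?_getD, List.getElem?_eq_getElem hl]
    rw [hget _ h1] at hmain
    rw [hmain]
    have hmem : (j : Int) ∈ PySem.List.pyRange 0 ((L.map pvF).length : Int) 1 := by
      rw [PySem.List.mem_pyRange_one]
      constructor
      · omega
      · simpa using hjL
    have hbs : (L.map pvF).getD j true = pvF L[j] := by
      simp [List.getD_eq_getElem?_getD, List.getElem?_map, List.getElem?_eq_getElem hjL]
    simp only [hmem, true_and, hbs]
    by_cases hp : pvF L[j] <;>
      simp [hp, List.getD_eq_getElem?_getD, List.getElem?_map, List.getElem?_eq_getElem hjL]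

-- erasing one None does not change the surviving (isSome) elements
theorem filter_erase_none (l : List (Option String)) :
    (l.erase none).filter (·.isSome) = l.filter (·.isSome) := by
  induction l with
  | nil => rfl
  | cons a l ih =>
      rcases Option.eq_none_or_eq_some a with ha | ⟨v, ha⟩
      · subst ha; simp [List.erase_cons_head]
      · subst ha
        rw [List.erase_cons_tail (by simp)]
        simp [ih]

-- the remove-None loop computes the isSome-filter
theorem pvRemoveLoop_eq_filter_aux :
    ∀ (n : Nat) (l : List (Option String)), l.length ≤ n →
      pvRemoveLoop l = l.filter (·.isSome) := by
  intro n
  induction n with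
  | zero =>
      intro l hl
      have : l = [] := List.eq_nil_of_length_eq_zero (by omega)
      subst this
      rw [pvRemoveLoop]
      split
      · rename_i l' h
        rw [(PySem.List.remove?_eq_none_iff [] none).mpr (by simp)] at h
        cases h
      · rfl
  | succ n ih =>
      intro l hl
      rw [pvRemoveLoop]
      split
      · rename_i l' h
        have hm : (none : Option String) ∈ l := by
          by_contra hn
          rw [(PySem.List.remove?_eq_none_iff l none).mpr hn] at h
          cases h
        rw [PySem.List.remove?_eq_some_erase l none hm] at h
        injection h with h
        subst h
        have hlt : (l.erase none).length < l.length := by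
          have := List.length_erase_of_mem hm
          have := List.length_pos_of_mem hm
          omega
        rw [ih _ (by omega), filter_erase_none]
      · rename_i h
        have hn : (none : Option String) ∉ l := (PySem.List.remove?_eq_none_iff l none).mp h
        rw [List.filter_eq_self.mpr]
        intro o ho
        rcases Option.eq_none_or_eq_some o with h' | ⟨v, h'⟩
        · exact absurd (h' ▸ ho) hn
        · simp [h']

theorem pvRemoveLoop_eq_filter (l : List (Option String)) :
    pvRemoveLoop l = l.filter (·.isSome) :=
  pvRemoveLoop_eq_filter_aux l.length l le_rfl

theorem filter_map_mark (L : List String) :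
    ((L.map (fun s => if pvF s then some s else none)).filter (·.isSome)).length
      = L.countP pvF := by
  induction L with
  | nil => rfl
  | cons a L ih =>
      by_cases hp : pvF a <;> simp [hp, ih]

-- ===== VERDICT (by name: the statement is the Claim_ definition above) =====
theorem satisfies_f_spec : Claim_equal_satisfies_f := by
  intro L _
  unfold Spec_satisfies_f satisfies_f satisfies_f_alt
  simp only []
  rw [show List.foldl (fun acc e => acc ++ [pvF e]) [] L = List.map pvF L from
    (PySem.List.foldl_append_singleton_eq_map pvF L []).trans (List.nil_append _)]
  rw [mark_eq_map, pvRemoveLoop_eq_filter, filter_map_mark]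
  rw [show (fun (j : Int) e => if PySem.Str.isIn "a" e then j + 1 else j)
      = (fun (j : Int) e => if pvF e then j + 1 else j) from rfl]
  rw [PySem.List.foldl_if_add_one]
  omega
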